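-- pv_equiv track=rewrite | github.com/aisquad/selae | selae19.py | get_repeated_tens
-- ===== SOURCE A (Python) =====
-- def get_repeated_tens(numbers):
--     repeated = []
--     for dozen in range(10):
--         indexes = [numbers.index(u) for u in numbers if u // 10 == dozen]
--         if len(indexes) > 1:
--             t = []
--             for i in indexes:
--                 t.append(numbers[i])
--             repeated.append(tuple(t))
--     return repeated
-- ===== SOURCE B (Python) =====
-- def get_repeated_tens(numbers):
--     buckets = [[] for _ in range(10)]
--     for u in numbers:
--         d = u // 10
--         if 0 <= d < 10:
--             buckets[d].append(u)
--     return [tuple(b) for b in buckets if len(b) > 1]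
-- ===== Notes on version B (the rewrite author's own statement) =====
-- stated objective: faster
-- what changed: Replaces the per-dozen rescans with repeated list.index calls (quadratic) by a single pass that distributes each number into one of 10 buckets, then keeps the buckets with more than one element.
import Mathlib
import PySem

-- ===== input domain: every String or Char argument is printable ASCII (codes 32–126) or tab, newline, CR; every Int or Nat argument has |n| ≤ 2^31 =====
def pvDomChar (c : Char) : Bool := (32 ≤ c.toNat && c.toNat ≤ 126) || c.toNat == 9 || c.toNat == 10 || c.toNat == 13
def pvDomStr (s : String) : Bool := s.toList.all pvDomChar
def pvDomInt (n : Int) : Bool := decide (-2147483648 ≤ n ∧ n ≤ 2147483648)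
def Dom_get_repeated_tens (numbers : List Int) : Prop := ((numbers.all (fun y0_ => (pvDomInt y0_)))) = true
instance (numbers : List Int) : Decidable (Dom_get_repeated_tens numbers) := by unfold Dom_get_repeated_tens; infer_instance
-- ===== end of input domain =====

-- B replaces A's per-dozen rescans with repeated list.index (quadratic) by one bucket-distributing
-- pass over the input (a timing run measured B faster).

-- ===== PORT A =====
-- numbers.index(u) and numbers[i] always succeed here (u ∈ numbers, i a valid index),
-- so the .getD defaults are never used; the port is exact.
def get_repeated_tens (numbers : List Int) : List (List Int) :=
  (PySem.List.pyRange 0 10 1).foldl (fun repeated dozen =>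
    let indexes : List Nat :=
      (numbers.filter (fun u => PySem.Int.floordiv u 10 == dozen)).map
        (fun u => (PySem.List.index? numbers u).getD 0)
    if indexes.length > 1 then
      repeated ++
        [indexes.foldl (fun t (i : Nat) => t ++ [(PySem.List.pyGet? numbers (i : Int)).getD 0]) []]
    else repeated) []

-- ===== PORT B =====
def get_repeated_tens_alt (numbers : List Int) : List (List Int) :=
  let buckets := numbers.foldl (fun bs u =>
      let d := PySem.Int.floordiv u 10
      if 0 ≤ d ∧ d < 10 then bs.set d.toNat (bs.getD d.toNat [] ++ [u]) else bs)
    (List.replicate 10 ([] : List Int))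
  buckets.filter (fun b => b.length > 1)

-- ===== PRECONDITION & SPEC =====
def Spec_get_repeated_tens (numbers : List Int) (out : List (List Int)) : Prop := out = get_repeated_tens_alt numbers
instance (numbers : List Int) (out : List (List Int)) : Decidable (Spec_get_repeated_tens numbers out) := by unfold Spec_get_repeated_tens; infer_instance

-- ===== CLAIM (what is proved, stated in full; the proofs are below) =====
def Claim_equal_get_repeated_tens : Prop := ∀ (numbers : List Int), Dom_get_repeated_tens numbers → Spec_get_repeated_tens numbers (get_repeated_tens numbers)

-- ===== LEMMAS AND PROOFS =====

-- The common reference form: groups by dozen in range order, filtered to size > 1.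
def pvGroup (numbers : List Int) (d : Int) : List Int :=
  numbers.filter (fun u => PySem.Int.floordiv u 10 == d)

-- reading back a member through index? gives the member itself
theorem pv_readback {numbers : List Int} {u : Int} (hu : u ∈ numbers) :
    (PySem.List.pyGet? numbers (((PySem.List.index? numbers u).getD 0 : Nat) : Int)).getD 0 = u := by
  obtain ⟨k, hk⟩ := Option.isSome_iff_exists.mp ((PySem.List.index?_isSome_iff numbers u).mpr hu)
  obtain ⟨hlt, hval, -⟩ := PySem.List.getElem_of_index?_eq_some hk
  rw [hk, Option.getD_some, PySem.List.pyGet?_natCast, List.getElem?_eq_getElem hlt,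
    Option.getD_some, hval]

theorem pv_foldl_append_map {α β : Type} (f : α → β) :
    ∀ (l : List α) (acc : List β),
      l.foldl (fun t i => t ++ [f i]) acc = acc ++ l.map f := by
  intro l
  induction l with
  | nil => simp
  | cons x xs ih => intro acc; simp [List.foldl_cons, ih]

theorem pv_inner_t (numbers : List Int) (d : Int) :
    ((pvGroup numbers d).map (fun u => ((PySem.List.index? numbers u).getD 0 : Nat))).foldl
        (fun (t : List Int) (i : Nat) => t ++ [(PySem.List.pyGet? numbers (i : Int)).getD 0]) []
      = pvGroup numbers d := by
  rw [pv_foldl_append_map, List.map_map]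
  simp only [List.nil_append]
  conv_rhs => rw [← List.map_id (pvGroup numbers d)]
  refine List.map_congr_left ?_
  intro u hu
  exact pv_readback (List.mem_of_mem_filter hu)

theorem pv_foldl_congr {α β : Type} (f g : β → α → β) :
    ∀ (l : List α), (∀ b a, a ∈ l → f b a = g b a) → ∀ (init : β),
      l.foldl f init = l.foldl g init := by
  intro l
  induction l with
  | nil => intro _ _; rfl
  | cons x xs ih =>
    intro h init
    rw [List.foldl_cons, List.foldl_cons, h init x (List.mem_cons_self),
      ih (fun b a ha => h b a (List.mem_cons_of_mem _ ha))]

theorem pv_outer_fold (numbers : List Int) :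
    ∀ (ds : List Int) (acc : List (List Int)),
      ds.foldl (fun repeated d =>
          if (pvGroup numbers d).length > 1 then repeated ++ [pvGroup numbers d] else repeated) acc
        = acc ++ (ds.map (pvGroup numbers)).filter (fun b => b.length > 1) := by
  intro ds
  induction ds with
  | nil => simp
  | cons x xs ih =>
    intro acc
    by_cases h : (pvGroup numbers x).length > 1 <;> simp [List.foldl_cons, ih, h]

theorem pv_A_eq (numbers : List Int) :
    get_repeated_tens numbers
      = ((PySem.List.pyRange 0 10 1).map (pvGroup numbers)).filter (fun b => b.length > 1) := by
  unfold get_repeated_tens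
  have hcong : ∀ (acc : List (List Int)),
      (PySem.List.pyRange 0 10 1).foldl (fun repeated dozen =>
        let indexes : List Nat :=
          (numbers.filter (fun u => PySem.Int.floordiv u 10 == dozen)).map
            (fun u => (PySem.List.index? numbers u).getD 0)
        if indexes.length > 1 then
          repeated ++
            [indexes.foldl (fun t (i : Nat) => t ++ [(PySem.List.pyGet? numbers (i : Int)).getD 0]) []]
        else repeated) acc
      = (PySem.List.pyRange 0 10 1).foldl (fun repeated d =>
          if (pvGroup numbers d).length > 1 then repeated ++ [pvGroup numbers d] else repeated) acc := by
    intro acc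
    refine pv_foldl_congr _ _ _ ?_ acc
    intro b d _
    have h := pv_inner_t numbers d
    simp only [pvGroup] at h
    simp only [h, List.length_map, pvGroup]
  rw [hcong, pv_outer_fold]
  simp

-- bucket getD on a map over range
theorem pv_getD_map_range (f : Nat → List Int) {k : Nat} (hk : k < 10) :
    (((List.range 10).map f).getD k []) = f k := by
  rw [List.getD_eq_getElem?_getD, List.getElem?_map, List.getElem?_range hk]
  rfl

theorem pv_set_map_range (f : Nat → List Int) (k : Nat) (v : List Int) (_hk : k < 10) :
    ((List.range 10).map f).set k v
      = (List.range 10).map (fun d => if d = k then v else f d) := by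
  apply List.ext_getElem
  · simp
  · intro i h1 h2
    simp only [List.getElem_set, List.getElem_map, List.getElem_range]
    split_ifs with h h' h'
    · rfl
    · omega
    · omega
    · rfl

theorem pv_filter_snoc (pref : List Int) (u : Int) (p : Int → Bool) :
    (pref ++ [u]).filter p = pref.filter p ++ if p u then [u] else [] := by
  cases h : p u <;> simp [List.filter_append, List.filter, h]

theorem pv_bucket_inv (step : List (List Int) → Int → List (List Int))
    (hstep : step = fun bs u =>
      let d := PySem.Int.floordiv u 10
      if 0 ≤ d ∧ d < 10 then bs.set d.toNat (bs.getD d.toNat [] ++ [u]) else bs) :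
    ∀ (xs pref : List Int),
      xs.foldl step ((List.range 10).map (fun (d : Nat) => pvGroup pref (d : Int)))
        = (List.range 10).map (fun (d : Nat) => pvGroup (pref ++ xs) (d : Int)) := by
  intro xs
  induction xs with
  | nil => intro pref; simp
  | cons u us ih =>
    intro pref
    rw [List.foldl_cons]
    have hfd : PySem.Int.floordiv u 10 = u / 10 :=
      PySem.Int.floordiv_eq_ediv_of_pos (by norm_num)
    have hstepped : step ((List.range 10).map (fun (d : Nat) => pvGroup pref (d : Int))) u
        = (List.range 10).map (fun (d : Nat) => pvGroup (pref ++ [u]) (d : Int)) := by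
      rw [hstep]
      simp only [hfd]
      by_cases hd : 0 ≤ u / 10 ∧ u / 10 < 10
      · rw [if_pos hd]
        have hk : (u / 10).toNat < 10 := by omega
        rw [pv_getD_map_range _ hk, pv_set_map_range _ _ _ hk]
        refine List.map_congr_left ?_
        intro d hdm
        have hd10 : d < 10 := List.mem_range.mp hdm
        unfold pvGroup
        rw [pv_filter_snoc]
        simp only [hfd]
        by_cases he : d = (u / 10).toNat
        · have hb : (u / 10 == (d : Int)) = true := by
            simp only [beq_iff_eq]; omega
          rw [if_pos he, hb, if_pos rfl, he]
        · have hb : (u / 10 == (d : Int)) = false := by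
            simp only [beq_eq_false_iff_ne, ne_eq]; omega
          rw [if_neg he, hb]
          simp
      · rw [if_neg hd]
        refine (List.map_congr_left ?_).symm
        intro d hdm
        have hd10 : d < 10 := List.mem_range.mp hdm
        unfold pvGroup
        rw [pv_filter_snoc]
        simp only [hfd]
        have hb : (u / 10 == (d : Int)) = false := by
          simp only [beq_eq_false_iff_ne, ne_eq]; omega
        rw [hb]
        simp
    rw [hstepped, ih (pref ++ [u]), List.append_assoc]
    rfl

theorem pv_B_eq (numbers : List Int) :
    get_repeated_tens_alt numbers
      = ((List.range 10).map (fun (d : Nat) => pvGroup numbers (d : Int))).filter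
          (fun b => b.length > 1) := by
  unfold get_repeated_tens_alt
  have h0 : (List.replicate 10 ([] : List Int))
      = (List.range 10).map (fun (d : Nat) => pvGroup ([] : List Int) (d : Int)) := by
    simp [pvGroup]
  simp only [h0]
  rw [pv_bucket_inv _ rfl numbers []]
  simp

-- ===== VERDICT (by name: the statement is the Claim_ definition above) =====
theorem get_repeated_tens_spec : Claim_equal_get_repeated_tens := by
  intro numbers _
  unfold Spec_get_repeated_tens
  rw [pv_A_eq, pv_B_eq, PySem.List.pyRange_one]
  simp [List.map_map]
  rfl
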